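-- pv_equiv track=rewrite | github.com/Gitcomplex/Python-Programming | Lists and Tuples/outliers.py | high_values
-- ===== SOURCE A (Python) =====
-- def high_values(data, max_valid):
--     start = 0
--
--     for index in range(len(data) - 1, -1, -1):
--         if data[index] <= max_valid:
--             start = index + 1
--             break
--
--     del data[start:]
--     return data
-- ===== SOURCE B (Python) =====
-- def high_values(data, max_valid):
--     # pop trailing out-of-range elements one at a time (same in-place mutation as A)
--     while data and not (data[-1] <= max_valid):
--         data.pop()
--     return data
-- ===== Notes on version B (the rewrite author's own statement) =====
-- stated objective: simpler
-- what changed: Replaces the backward index-scan with break plus a single slice deletion by a direct pop loop that removes trailing elements from the end, maintaining no cutoff index.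
import Mathlib
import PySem

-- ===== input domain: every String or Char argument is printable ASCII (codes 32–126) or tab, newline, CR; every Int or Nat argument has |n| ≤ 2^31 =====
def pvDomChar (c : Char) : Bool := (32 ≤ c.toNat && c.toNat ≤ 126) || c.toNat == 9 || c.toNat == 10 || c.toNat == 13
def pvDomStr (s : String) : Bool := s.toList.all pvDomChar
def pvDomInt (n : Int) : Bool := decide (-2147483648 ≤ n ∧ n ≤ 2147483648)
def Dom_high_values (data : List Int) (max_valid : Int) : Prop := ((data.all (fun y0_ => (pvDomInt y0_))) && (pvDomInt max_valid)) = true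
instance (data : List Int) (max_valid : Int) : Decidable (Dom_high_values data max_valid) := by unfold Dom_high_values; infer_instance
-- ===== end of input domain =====

-- B pops trailing out-of-range elements directly instead of A's backward index scan plus slice deletion (objective: simpler).
-- Both Pythons mutate `data` in place the same way; the equivalence proved here is about the return value.

-- ===== PORT A =====
-- the backward 'for index in range(len(data)-1, -1, -1)' loop with break; every index visited
-- is in range, so pyGetD with default 0 is exact for data[index]
def hvLoop (data : List Int) (mv : Int) : List Int → Int
  | [] => 0
  | i :: rest => if PySem.List.pyGetD data i 0 ≤ mv then i + 1 else hvLoop data mv rest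

-- 'del data[start:]; return data' returns data[:start]
def high_values (data : List Int) (max_valid : Int) : List Int :=
  PySem.List.slice data none (some (hvLoop data max_valid (PySem.List.pyRange ((data.length : Int) - 1) (-1) (-1))))

-- ===== PORT B =====
-- 'while data and not (data[-1] <= max_valid): data.pop()' — data[-1] on a nonempty list is getLast?
def high_values_alt (data : List Int) (max_valid : Int) : List Int :=
  match h : data.getLast? with
  | none => data
  | some x => if x ≤ max_valid then data else high_values_alt data.dropLast max_valid
termination_by data.length
decreasing_by
  have hne : data ≠ [] := by intro hn; simp [hn] at h
  have := List.length_pos_iff.mpr hne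
  simp [List.length_dropLast]; omega

-- ===== PRECONDITION & SPEC =====
def Spec_high_values (data : List Int) (max_valid : Int) (out : List Int) : Prop := out = high_values_alt data max_valid
instance (data : List Int) (max_valid : Int) (out : List Int) : Decidable (Spec_high_values data max_valid out) := by unfold Spec_high_values; infer_instance

-- ===== CLAIM (what is proved, stated in full; the proofs are below) =====
def Claim_equal_high_values : Prop := ∀ (data : List Int) (max_valid : Int), Dom_high_values data max_valid → Spec_high_values data max_valid (high_values data max_valid)

-- ===== LEMMAS AND PROOFS =====
lemma hvLoop_congr (d1 d2 : List Int) (mv : Int) (idxs : List Int)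
    (h : ∀ i ∈ idxs, PySem.List.pyGetD d1 i 0 = PySem.List.pyGetD d2 i 0) :
    hvLoop d1 mv idxs = hvLoop d2 mv idxs := by
  induction idxs with
  | nil => rfl
  | cons i rest ih =>
    simp only [hvLoop, h i (by simp)]
    split
    · rfl
    · exact ih (fun j hj => h j (by simp [hj]))

lemma hvLoop_bounds (d : List Int) (mv : Int) (idxs : List Int) (B : Int) (hB : 0 ≤ B)
    (h : ∀ i ∈ idxs, 0 ≤ i ∧ i + 1 ≤ B) :
    0 ≤ hvLoop d mv idxs ∧ hvLoop d mv idxs ≤ B := by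
  induction idxs with
  | nil => simpa [hvLoop] using hB
  | cons i rest ih =>
    simp only [hvLoop]
    split
    · have := h i (by simp); omega
    · exact ih (fun j hj => h j (by simp [hj]))

lemma alt_concat (xs : List Int) (x mv : Int) :
    high_values_alt (xs ++ [x]) mv = if x ≤ mv then xs ++ [x] else high_values_alt xs mv := by
  rw [high_values_alt]
  split
  · rename_i h; simp at h
  · rename_i y h
    simp only [List.getLast?_concat, Option.some.injEq] at h
    subst h
    rw [List.dropLast_concat]

lemma hv_eq (data : List Int) (mv : Int) : high_values data mv = high_values_alt data mv := by
  induction data using List.reverseRecOn with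
  | nil =>
    rw [high_values_alt]
    simp [high_values, hvLoop, PySem.List.pyRange_neg_one_eq_nil (by norm_num : (-1:Int) ≤ -1),
      PySem.List.slice_to ([] : List Int) (le_refl 0)]
  | append_singleton xs x ih =>
    rw [alt_concat, high_values]
    have hlen : ((xs ++ [x]).length : Int) - 1 = (xs.length : Int) := by simp
    rw [hlen, PySem.List.pyRange_neg_one_cons (by omega : (-1:Int) < (xs.length : Int))]
    have hget : PySem.List.pyGetD (xs ++ [x]) (xs.length : Int) 0 = x := by
      rw [PySem.List.pyGetD_natCast]
      simp
    simp only [hvLoop, hget]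
    split
    · -- last element kept: start = len(xs)+1, slice keeps everything
      rw [PySem.List.slice_to (xs ++ [x]) (by omega : (0:Int) ≤ (xs.length : Int) + 1)]
      have ht : ((xs.length : Int) + 1).toNat = xs.length + 1 := by omega
      rw [ht]
      exact List.take_of_length_le (by simp)
    · -- last element dropped: the remaining loop sees only indices < len xs
      rw [← ih, high_values]
      have hidx : ∀ i ∈ PySem.List.pyRange ((xs.length : Int) - 1) (-1) (-1), 0 ≤ i ∧ i + 1 ≤ (xs.length : Int) := by
        intro i hi
        rw [PySem.List.mem_pyRange_neg_one] at hi
        omega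
      have hcongr : hvLoop (xs ++ [x]) mv (PySem.List.pyRange ((xs.length : Int) - 1) (-1) (-1))
          = hvLoop xs mv (PySem.List.pyRange ((xs.length : Int) - 1) (-1) (-1)) := by
        apply hvLoop_congr
        intro i hi
        have hb := hidx i hi
        obtain ⟨k, hk, rfl⟩ : ∃ k : Nat, k < xs.length ∧ (i = (k : Int)) := by
          refine ⟨i.toNat, by omega, by omega⟩
        rw [PySem.List.pyGetD_natCast, PySem.List.pyGetD_natCast]
        simp [List.getElem?_append_left hk]
      rw [hcongr]
      set s := hvLoop xs mv (PySem.List.pyRange ((xs.length : Int) - 1) (-1) (-1)) with hs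
      have hb := hvLoop_bounds xs mv _ (xs.length : Int) (by omega) hidx
      rw [← hs] at hb
      rw [PySem.List.slice_to (xs ++ [x]) hb.1, PySem.List.slice_to xs hb.1]
      rw [List.take_append_of_le_length (by omega)]

-- ===== VERDICT (by name: the statement is the Claim_ definition above) =====
theorem high_values_spec : Claim_equal_high_values := by
  intro data mv _
  unfold Spec_high_values
  exact hv_eq data mv
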